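-- pv_equiv track=rewrite | github.com/DinuC28/password_strenght_checker | strength_checker.py | checking_sequence
-- ===== SOURCE A (Python) =====
-- def checking_sequence(password, max_sequence_length):
--
--     passwordValue = [ord(c) for c in password]
--
--     for i in range(len(passwordValue) - max_sequence_length + 1):
--         sequence = passwordValue[i:i + max_sequence_length]
--         if(sequence == list(range(sequence[0], sequence[0] + max_sequence_length))
--                 or sequence == list(range(sequence[0], sequence[0] + max_sequence_length, -1))
--         ):
--             return False
--     return True
-- ===== SOURCE B (Python) =====
-- def checking_sequence(password, max_sequence_length):
--     run = 1
--     prev = None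
--     for c in password:
--         o = ord(c)
--         run = run + 1 if prev is not None and o == prev + 1 else 1
--         if run >= max_sequence_length:
--             return False
--         prev = o
--     return True
-- ===== Notes on version B (the rewrite author's own statement) =====
-- stated objective: faster
-- what changed: Replaced the window scan that rebuilds a slice and a fresh range list for every start index with a single left-to-right pass tracking the length of the current ascending-by-1 run (A's descending-range branch is dead code and is dropped).
-- outside the precondition, e.g. on checking_sequence('aa', -1): A returns False, B returns False
import Mathlib
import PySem

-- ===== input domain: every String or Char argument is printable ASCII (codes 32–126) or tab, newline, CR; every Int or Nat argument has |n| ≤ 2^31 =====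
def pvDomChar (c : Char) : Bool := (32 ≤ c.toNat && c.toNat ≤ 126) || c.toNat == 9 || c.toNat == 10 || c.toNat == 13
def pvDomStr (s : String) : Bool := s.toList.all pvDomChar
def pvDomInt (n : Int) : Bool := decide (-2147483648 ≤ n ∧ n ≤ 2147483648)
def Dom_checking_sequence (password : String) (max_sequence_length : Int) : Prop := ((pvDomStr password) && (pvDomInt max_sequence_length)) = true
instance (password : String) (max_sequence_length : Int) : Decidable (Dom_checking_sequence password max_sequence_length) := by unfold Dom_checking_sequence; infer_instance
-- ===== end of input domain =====

-- B replaces A's per-index slice-vs-range comparison with one pass tracking the current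
-- ascending-by-1 run length (objective: faster; A's descending-range branch never fires for
-- max_sequence_length >= 1 and is dropped).


-- ===== PORT A =====
-- the for-loop over the index range, with early return False
def chkA (pv : List Int) (L : Int) : List Int → Bool
  | [] => true
  | i :: rest =>
    let sequence := PySem.List.slice pv (some i) (some (i + L))
    match PySem.List.pyGet? sequence 0 with
    | none => true  -- Python raises IndexError here (sequence[0] on empty slice); unreachable under Pre_
    | some a =>
      if sequence = PySem.List.pyRange a (a + L) 1 ∨ sequence = PySem.List.pyRange a (a + L) (-1)
      then false
      else chkA pv L rest

def checking_sequence (password : String) (max_sequence_length : Int) : Bool :=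
  let passwordValue := password.toList.map (fun c => (c.toNat : Int))
  chkA passwordValue max_sequence_length
    (PySem.List.pyRange 0 ((passwordValue.length : Int) - max_sequence_length + 1) 1)

-- ===== PORT B =====
-- single pass: prev = previous code point, run = length of current ascending-by-1 run
def chkB (L : Int) (prev : Option Int) (run : Int) : List Char → Bool
  | [] => true
  | c :: rest =>
    let o : Int := c.toNat
    let run' : Int := match prev with
      | some p => if o = p + 1 then run + 1 else 1
      | none => 1
    if L ≤ run' then false else chkB L (some o) run' rest

def checking_sequence_alt (password : String) (max_sequence_length : Int) : Bool :=
  chkB max_sequence_length none 1 password.toList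

-- ===== PRECONDITION & SPEC =====
-- Pre_ excludes max_sequence_length ≤ 0, outside the checker's natural domain: there A
-- raises IndexError on most inputs (sequence[0] on an empty negative slice), and on the few
-- where its otherwise-dead descending-range branch fires first it returns False, as does B.
def Pre_checking_sequence (password : String) (max_sequence_length : Int) : Prop :=
  1 ≤ max_sequence_length
instance (password : String) (max_sequence_length : Int) : Decidable (Pre_checking_sequence password max_sequence_length) := by unfold Pre_checking_sequence; infer_instance

def pvWitness_checking_sequence : String × Int := ("abce", 3)

def Spec_checking_sequence (password : String) (max_sequence_length : Int) (out : Bool) : Prop := out = checking_sequence_alt password max_sequence_length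
instance (password : String) (max_sequence_length : Int) (out : Bool) : Decidable (Spec_checking_sequence password max_sequence_length out) := by unfold Spec_checking_sequence; infer_instance

-- ===== CLAIM (what is proved, stated in full; the proofs are below) =====
def Claim_equal_checking_sequence : Prop := ∀ (password : String) (max_sequence_length : Int), Dom_checking_sequence password max_sequence_length → Pre_checking_sequence password max_sequence_length → Spec_checking_sequence password max_sequence_length (checking_sequence password max_sequence_length)

-- ===== LEMMAS AND PROOFS =====

-- length (in code points) of the ascending-by-1 continuation of p at the front of the list
def ascCont (p : Int) : List Int → Nat
  | [] => 0
  | x :: t => if x = p + 1 then ascCont x t + 1 else 0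

-- length of the maximal ascending-by-1 run at the front of the list
def ascRunLen : List Int → Nat
  | [] => 0
  | x :: t => ascCont x t + 1

-- "no contiguous ascending-by-1 run of length ≥ K anywhere": the common characterisation
def safeSpec (K : Nat) (xs : List Int) : Bool := xs.tails.all (fun t => decide (ascRunLen t < K))

def ords (cs : List Char) : List Int := cs.map (fun c => (c.toNat : Int))

theorem ascCont_le_length (p : Int) (t : List Int) : ascCont p t ≤ t.length := by
  induction t generalizing p with
  | nil => simp [ascCont]
  | cons x t ih =>
    simp only [ascCont, List.length_cons]
    split
    · exact Nat.succ_le_succ (ih x)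
    · omega

theorem safeSpec_nil (K : Nat) : safeSpec K [] = (decide (0 < K)) := by
  simp [safeSpec, ascRunLen]

theorem safeSpec_cons (K : Nat) (x : Int) (t : List Int) :
    safeSpec K (x :: t) = (decide (ascCont x t + 1 < K) && safeSpec K t) := by
  simp only [safeSpec, List.tails_cons, List.all_cons]
  rfl

theorem safeSpec_short (K : Nat) (xs : List Int) (h : xs.length < K) : safeSpec K xs = true := by
  induction xs with
  | nil => simp [safeSpec_nil]; omega
  | cons x t ih =>
    rw [safeSpec_cons, ih (by simp at h ⊢; omega)]
    have := ascCont_le_length x t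
    simp at h ⊢
    omega

-- ===== B side: the single pass computes safeSpec =====

theorem chkB_inv (K : Nat) (xs : List Char) : ∀ (p : Int) (r : Nat), 1 ≤ r → r < K →
    chkB (K : Int) (some p) (r : Int) xs
      = (decide (r + ascCont p (ords xs) < K) && safeSpec K (ords xs)) := by
  induction xs with
  | nil =>
    intro p r h1 h2
    simp [chkB, ords, safeSpec_nil, ascCont]
    omega
  | cons c rest ih =>
    intro p r h1 h2
    have hords : ords (c :: rest) = ((c.toNat : Int)) :: ords rest := by simp [ords]
    rw [hords, safeSpec_cons]
    simp only [chkB]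
    by_cases h : (c.toNat : Int) = p + 1
    · rw [if_pos h,
          show ascCont p (((c.toNat : Int)) :: ords rest)
              = ascCont ((c.toNat : Int)) (ords rest) + 1 from by simp [ascCont, h]]
      by_cases hge : K ≤ r + 1
      · rw [if_pos (by exact_mod_cast hge : (K : Int) ≤ (r : Int) + 1)]
        have : ¬ (r + (ascCont ((c.toNat : Int)) (ords rest) + 1) < K) := by omega
        simp [this]
      · rw [if_neg (by exact_mod_cast hge : ¬ ((K : Int) ≤ (r : Int) + 1))]
        rw [show ((r : Int) + 1) = (((r + 1 : Nat)) : Int) from by push_cast; ring]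
        rw [ih (c.toNat : Int) (r + 1) (by omega) (by omega)]
        by_cases hc : r + 1 + ascCont ((c.toNat : Int)) (ords rest) < K
        · have h2' : ascCont ((c.toNat : Int)) (ords rest) + 1 < K := by omega
          have h3' : r + (ascCont ((c.toNat : Int)) (ords rest) + 1) < K := by omega
          simp [hc, h2', h3']
        · have h3' : ¬ (r + (ascCont ((c.toNat : Int)) (ords rest) + 1) < K) := by omega
          simp [hc, h3']
    · rw [if_neg h,
          show ascCont p (((c.toNat : Int)) :: ords rest) = 0 from by simp [ascCont, h]]
      rw [if_neg (by exact_mod_cast (by omega : ¬ (K ≤ 1)) : ¬ ((K : Int) ≤ (1 : Int)))]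
      rw [show (1 : Int) = ((1 : Nat) : Int) from by norm_num]
      rw [ih (c.toNat : Int) 1 (by omega) (by omega)]
      have htriv : (r + 0 < K) := by omega
      by_cases hc : 1 + ascCont ((c.toNat : Int)) (ords rest) < K
      · have : ascCont ((c.toNat : Int)) (ords rest) + 1 < K := by omega
        simp [hc, this]
        exact fun _ => h2
      · have : ¬ (ascCont ((c.toNat : Int)) (ords rest) + 1 < K) := by omega
        simp [hc, this]

theorem altB (K : Nat) (hK : 1 ≤ K) (cs : List Char) :
    chkB (K : Int) none 1 cs = safeSpec K (ords cs) := by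
  cases cs with
  | nil => simp [chkB, ords, safeSpec_nil]; omega
  | cons c rest =>
    simp only [chkB]
    by_cases h1 : K = 1
    · subst h1
      rw [if_pos (by norm_num)]
      rw [show ords (c :: rest) = ((c.toNat : Int)) :: ords rest from by simp [ords], safeSpec_cons]
      simp
    · have hlt : ¬ ((K : Int) ≤ (1 : Int)) := by exact_mod_cast (by omega : ¬ (K ≤ 1))
      rw [if_neg hlt]
      rw [show (1 : Int) = ((1 : Nat) : Int) from by norm_num,
          chkB_inv K rest (c.toNat : Int) 1 (by omega) (by omega)]
      rw [show ords (c :: rest) = ((c.toNat : Int)) :: ords rest from by simp [ords], safeSpec_cons]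
      congr 1
      simp only [decide_eq_decide]
      omega

-- ===== A side: the window scan computes safeSpec =====

-- a window of length k+1 starting at x equals range(x, x+k+1) iff the run continues k steps
theorem take_eq_pyRange_iff (t : List Int) (x : Int) (k : Nat) (hk : k ≤ t.length) :
    ((x :: t).take (k + 1) = PySem.List.pyRange x (x + ((k : Int) + 1)) 1) ↔ k ≤ ascCont x t := by
  induction t generalizing x k with
  | nil =>
    have hk0 : k = 0 := by simpa using hk
    subst hk0
    have h1 : x + (((0 : Nat) : Int) + 1) = x + 1 := by push_cast; ring
    rw [h1, PySem.List.pyRange_one_singleton]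
    simp [ascCont]
  | cons y t ih =>
    cases k with
    | zero =>
      have h1 : x + (((0 : Nat) : Int) + 1) = x + 1 := by push_cast; ring
      rw [h1, PySem.List.pyRange_one_singleton]
      simp [ascCont]
    | succ k' =>
      push_cast
      rw [PySem.List.pyRange_one_cons (by omega : x < x + (((k' : Int)) + 1 + 1))]
      simp only [List.take_succ_cons, List.cons.injEq, true_and]
      by_cases hy : y = x + 1
      · subst hy
        rw [show x + (((k' : Int)) + 1 + 1) = (x + 1) + (((k' : Int)) + 1) from by ring]
        have := ih (x + 1) k' (by simpa using hk)
        push_cast at this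
        rw [List.take_succ_cons] at this
        rw [this]
        simp [ascCont]
      · constructor
        · intro heq
          exfalso
          rw [PySem.List.pyRange_one_cons (by omega : x + 1 < x + (((k' : Int)) + 1 + 1))] at heq
          simp only [List.cons.injEq] at heq
          exact hy heq.1
        · intro hle
          exfalso
          simp only [ascCont, if_neg hy] at hle
          omega

-- shifting the index list by one moves the scan to the tail
theorem chkA_shift (x : Int) (t : List Int) (L : Int) (hL : 1 ≤ L) :
    ∀ js : List Int, (∀ j ∈ js, 1 ≤ j) →
      chkA (x :: t) L js = chkA t L (js.map (· - 1)) := by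
  intro js
  induction js with
  | nil => intro _; simp [chkA]
  | cons j rest ih =>
    intro hmem
    have hj : 1 ≤ j := hmem j (List.mem_cons_self)
    have hslice : PySem.List.slice (x :: t) (some j) (some (j + L))
        = PySem.List.slice t (some (j - 1)) (some ((j - 1) + L)) := by
      rw [PySem.List.slice_toNat (x :: t) (by omega) (by omega),
          PySem.List.slice_toNat t (by omega) (by omega)]
      have h1 : j.toNat = (j - 1).toNat + 1 := by omega
      have h2 : (j + L).toNat - j.toNat = ((j - 1) + L).toNat - (j - 1).toNat := by omega
      rw [h2, h1, List.drop_succ_cons]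
    have harith : (j - 1) + L = j + L - 1 := by ring
    cases hg : PySem.List.pyGet? (PySem.List.slice t (some (j - 1)) (some (j + L - 1))) 0 with
    | none => simp only [chkA, List.map_cons, hslice, harith, hg]
    | some a =>
      simp only [chkA, List.map_cons, hslice, harith, hg]
      split
      · rfl
      · exact ih (fun i hi => hmem i (List.mem_cons_of_mem j hi))

theorem chkA_spec (K : Nat) (hK : 1 ≤ K) (xs : List Int) :
    chkA xs (K : Int) (PySem.List.pyRange 0 ((xs.length : Int) - K + 1) 1) = safeSpec K xs := by
  induction xs with
  | nil =>
    rw [PySem.List.pyRange_one_eq_nil (by simp; omega)]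
    simp [chkA, safeSpec_nil]; omega
  | cons x t ih =>
    by_cases hn : (x :: t).length < K
    · rw [PySem.List.pyRange_one_eq_nil (by simp at hn ⊢; omega)]
      rw [safeSpec_short K _ hn]
      rfl
    · have hKn : K ≤ t.length + 1 := by simp at hn; omega
      rw [PySem.List.pyRange_one_cons (by simp; omega)]
      have hslice : PySem.List.slice (x :: t) (some 0) (some (0 + (K : Int)))
          = (x :: t).take K := by
        rw [show (0 : Int) + (K : Int) = ((K : Nat) : Int) from by ring]
        simp [PySem.List.slice_to_natCast]
      have htake : (x :: t).take K = x :: t.take (K - 1) := by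
        cases K with
        | zero => omega
        | succ k => simp
      simp only [chkA, hslice, htake, PySem.List.pyGet?_zero_cons]
      have hneg : PySem.List.pyRange x (x + (K : Int)) (-1) = [] :=
        PySem.List.pyRange_neg_one_eq_nil (by omega)
      have hd2 : ¬ (x :: t.take (K - 1) = PySem.List.pyRange x (x + (K : Int)) (-1)) := by
        rw [hneg]; simp
      have hd1 : (x :: t.take (K - 1) = PySem.List.pyRange x (x + (K : Int)) 1)
          ↔ (K - 1) ≤ ascCont x t := by
        have h := take_eq_pyRange_iff t x (K - 1) (by omega)
        rw [Nat.sub_add_cancel hK] at h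
        rw [show ((K - 1 : Nat) : Int) + 1 = (K : Int) from by omega] at h
        rw [← htake]
        exact h
      rw [safeSpec_cons]
      by_cases hc : (K - 1) ≤ ascCont x t
      · rw [if_pos (Or.inl (hd1.mpr hc))]
        have : ¬ (ascCont x t + 1 < K) := by omega
        simp [this]
      · rw [if_neg (by rw [hd1]; tauto)]
        rw [show (0 : Int) + 1 = 1 from by norm_num]
        rw [chkA_shift x t (K : Int) (by exact_mod_cast hK) _
            (fun j hj => (PySem.List.mem_pyRange_one.mp hj).1)]
        have hmap : (PySem.List.pyRange 1 (((x :: t).length : Int) - K + 1) 1).map (· - 1)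
            = PySem.List.pyRange 0 ((t.length : Int) - K + 1) 1 := by
          rw [PySem.List.pyRange_one, PySem.List.pyRange_one, List.map_map]
          have hlen : ((((x :: t).length : Int) - K + 1) - 1).toNat
              = (((t.length : Int) - K + 1) - 0).toNat := by simp; omega
          rw [hlen]
          apply List.map_congr_left
          intro k _
          simp [Function.comp]
        rw [hmap, ih]
        have : ascCont x t + 1 < K := by omega
        simp [this]

-- ===== main theorems' glue =====

theorem ports_agree (password : String) (L : Int) (hL : 1 ≤ L) :
    checking_sequence password L = checking_sequence_alt password L := by
  obtain ⟨K, hK⟩ : ∃ K : Nat, L = (K : Int) := ⟨L.toNat, by omega⟩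
  have hK1 : 1 ≤ K := by omega
  subst hK
  unfold checking_sequence checking_sequence_alt
  simp only []
  rw [altB K hK1]
  have : (password.toList.map (fun c => (c.toNat : Int))) = ords password.toList := rfl
  rw [this]
  have hlen : (ords password.toList).length = password.toList.length := by simp [ords]
  exact chkA_spec K hK1 (ords password.toList)

-- ===== VERDICT (by name: the statement is the Claim_ definition above) =====
theorem checking_sequence_spec : Claim_equal_checking_sequence := by
  intro password L _ hPre
  unfold Spec_checking_sequence
  exact ports_agree password L hPre
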